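-- pv_equiv track=rewrite | github.com/mrworldwide1/ICS4U | Python Assignment 5.py | commonChar
-- ===== SOURCE A (Python) =====
-- def commonChar(a, b):
--     letters = []
--     commonLetters = []
--
--     # check each letter in alphabet against the two input strings
--     for char in "abcdefghijklmnopqrstuvwxyz":
--         # add letter to list if common and not already present
--         if (char in a and char in b) and (char not in commonLetters):
--             commonLetters.append(char)
--     for char in "ABCDEFGHIJKLMNOPQRSTUVWXYZ":
--         # add letter to list if common and not already present
--         if (char in a and char in b) and (char not in commonLetters):
--             commonLetters.append(char)
--     return len(commonLetters)
-- ===== SOURCE B (Python) =====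
-- def commonChar(a, b):
--     xs = sorted(set(a))
--     ys = sorted(set(b))
--     i = j = n = 0
--     while i < len(xs) and j < len(ys):
--         if xs[i] < ys[j]:
--             i += 1
--         elif ys[j] < xs[i]:
--             j += 1
--         else:
--             if 'a' <= xs[i] <= 'z' or 'A' <= xs[i] <= 'Z':
--                 n += 1
--             i += 1
--             j += 1
--     return n
-- ===== Notes on version B (the rewrite author's own statement) =====
-- stated objective: alternative
-- what changed: Replaces the two fixed-alphabet scans with linear membership tests by a sort-then-merge intersection: sort the distinct characters of each string and walk both sorted lists with two pointers, counting matches that lie in the ASCII letter ranges.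
import Mathlib
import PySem

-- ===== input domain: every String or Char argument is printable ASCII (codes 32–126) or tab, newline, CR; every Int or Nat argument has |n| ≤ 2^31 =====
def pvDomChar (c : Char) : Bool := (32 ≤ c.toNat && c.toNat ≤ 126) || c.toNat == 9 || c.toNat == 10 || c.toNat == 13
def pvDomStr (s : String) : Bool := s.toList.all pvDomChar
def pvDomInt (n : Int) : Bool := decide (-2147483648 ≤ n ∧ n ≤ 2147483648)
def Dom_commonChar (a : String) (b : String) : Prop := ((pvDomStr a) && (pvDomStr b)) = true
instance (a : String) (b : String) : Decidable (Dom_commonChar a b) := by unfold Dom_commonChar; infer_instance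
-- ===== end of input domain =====

-- B replaces A's two alphabet scans by sorting the distinct characters of each
-- string and counting common letters with a two-pointer merge; same return value.

-- ===== PORT A =====
-- Python's `char in a` for a single-character `char` is a substring test that
-- coincides with character membership: ported exactly as `a.toList.contains c`.
def commonChar (a : String) (b : String) : Int :=
  let commonLetters : List Char :=
    "abcdefghijklmnopqrstuvwxyz".toList.foldl
      (fun acc c =>
        if (a.toList.contains c && b.toList.contains c) && !acc.contains c
        then acc ++ [c] else acc) []
  let commonLetters2 : List Char :=
    "ABCDEFGHIJKLMNOPQRSTUVWXYZ".toList.foldl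
      (fun acc c =>
        if (a.toList.contains c && b.toList.contains c) && !acc.contains c
        then acc ++ [c] else acc) commonLetters
  (commonLetters2.length : Int)

-- ===== PORT B =====
-- 'a' <= x <= 'z' or 'A' <= x <= 'Z'
def pvIsLetter (c : Char) : Bool := ('a' ≤ c && c ≤ 'z') || ('A' ≤ c && c ≤ 'Z')

-- the two-pointer while loop over the two sorted lists, as structural recursion
def pvMergeCount : List Char → List Char → Int
  | [], _ => 0
  | _ :: _, [] => 0
  | x :: xs, y :: ys =>
    if x < y then pvMergeCount xs (y :: ys)
    else if y < x then pvMergeCount (x :: xs) ys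
    else (if pvIsLetter x then 1 else 0) + pvMergeCount xs ys
termination_by xs ys => xs.length + ys.length
decreasing_by all_goals (simp; try omega)

-- xs = sorted(set(a)); ys = sorted(set(b)); merge
def commonChar_alt (a : String) (b : String) : Int :=
  pvMergeCount (PySem.List.sorted (PySem.Set.ofList a.toList) (fun x => x) false)
               (PySem.List.sorted (PySem.Set.ofList b.toList) (fun x => x) false)

-- ===== PRECONDITION & SPEC =====
def Spec_commonChar (a : String) (b : String) (out : Int) : Prop := out = commonChar_alt a b
instance (a : String) (b : String) (out : Int) : Decidable (Spec_commonChar a b out) := by unfold Spec_commonChar; infer_instance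

-- ===== CLAIM (what is proved, stated in full; the proofs are below) =====
def Claim_equal_commonChar : Prop := ∀ (a : String) (b : String), Dom_commonChar a b → Spec_commonChar a b (commonChar a b)

-- ===== LEMMAS AND PROOFS =====

-- A's append-if-new loop over a duplicate-free list, started disjointly, is append-filter.
theorem foldl_append_if_new (p : Char → Bool) :
    ∀ (l acc : List Char), l.Nodup → (∀ c ∈ l, c ∉ acc) →
      l.foldl (fun acc c => if p c && !acc.contains c then acc ++ [c] else acc) acc
        = acc ++ l.filter p := by
  intro l
  induction l with
  | nil => intro acc _ _; simp
  | cons c t ih =>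
    intro acc hnd hdis
    have hc : acc.contains c = false := by
      simpa using hdis c (by simp)
    by_cases hp : p c = true
    · have hcond : (p c && !acc.contains c) = true := by rw [hp, hc]; rfl
      simp only [List.foldl_cons, hcond, if_true]
      rw [ih (acc ++ [c]) (List.Nodup.of_cons hnd)]
      · simp [hp]
      · intro d hd
        simp only [List.mem_append, List.mem_singleton]
        push Not
        refine ⟨hdis d (by simp [hd]), ?_⟩
        intro hdc
        exact (List.nodup_cons.mp hnd).1 (hdc ▸ hd)
    · have hp' : p c = false := by simpa using hp
      have hcond : (p c && !acc.contains c) = false := by rw [hp']; rfl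
      simp only [List.foldl_cons, hcond, Bool.false_eq_true, if_false]
      rw [ih acc (List.Nodup.of_cons hnd) (fun d hd => hdis d (by simp [hd]))]
      simp [hp']

-- A computes the length of the filter of the 52-letter alphabet.
theorem commonChar_eq_filter (a b : String) :
    commonChar a b =
      (("abcdefghijklmnopqrstuvwxyzABCDEFGHIJKLMNOPQRSTUVWXYZ".toList).filter
        (fun c => a.toList.contains c && b.toList.contains c)).length := by
  have hdisj : ∀ c ∈ "abcdefghijklmnopqrstuvwxyz".toList,
      c ∉ "ABCDEFGHIJKLMNOPQRSTUVWXYZ".toList := by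
    have h : ("abcdefghijklmnopqrstuvwxyz".toList.all
        (fun c => !("ABCDEFGHIJKLMNOPQRSTUVWXYZ".toList.contains c))) = true := by decide
    intro c hc
    simpa using List.all_eq_true.mp h c hc
  have e1 : commonChar a b =
      (("ABCDEFGHIJKLMNOPQRSTUVWXYZ".toList.foldl
        (fun acc c =>
          if (a.toList.contains c && b.toList.contains c) && !acc.contains c
          then acc ++ [c] else acc)
        ("abcdefghijklmnopqrstuvwxyz".toList.foldl
          (fun acc c =>
            if (a.toList.contains c && b.toList.contains c) && !acc.contains c
            then acc ++ [c] else acc) [])).length : Int) := rfl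
  rw [e1]
  rw [foldl_append_if_new (fun c => a.toList.contains c && b.toList.contains c)
      "abcdefghijklmnopqrstuvwxyz".toList [] (by decide) (by intro c _ h; simp at h)]
  rw [List.nil_append]
  rw [foldl_append_if_new (fun c => a.toList.contains c && b.toList.contains c)
      "ABCDEFGHIJKLMNOPQRSTUVWXYZ".toList _ (by decide)
      (fun c hc hmem => hdisj c (List.mem_of_mem_filter hmem) hc)]
  have hsplit : ("abcdefghijklmnopqrstuvwxyzABCDEFGHIJKLMNOPQRSTUVWXYZ".toList)
      = "abcdefghijklmnopqrstuvwxyz".toList ++ "ABCDEFGHIJKLMNOPQRSTUVWXYZ".toList := by decide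
  rw [hsplit, List.filter_append]

-- B's merge on strictly increasing lists counts the letter elements common to both.
theorem pvMergeCount_eq (xs ys : List Char)
    (hx : xs.Pairwise (· < ·)) (hy : ys.Pairwise (· < ·)) :
    pvMergeCount xs ys
      = ((xs.filter (fun c => ys.contains c && pvIsLetter c)).length : Int) := by
  fun_induction pvMergeCount xs ys with
  | case1 ys => simp
  | case2 x xs => simp
  | case3 x xs y ys hlt ih =>
    have hxny : ((y :: ys).contains x && pvIsLetter x) = false := by
      have : (y :: ys).contains x = false := by
        simp only [List.contains_eq_mem, decide_eq_false_iff_not, List.mem_cons]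
        rintro (rfl | hmem)
        · exact absurd hlt (lt_irrefl x)
        · exact absurd (lt_trans hlt ((List.pairwise_cons.mp hy).1 x hmem)) (lt_irrefl x)
      rw [this]; rfl
    rw [ih (List.Pairwise.of_cons hx) hy, List.filter_cons_of_neg (by rw [hxny]; exact Bool.false_ne_true)]
  | case4 x xs y ys hnlt hlt ih =>
    rw [ih hx (List.Pairwise.of_cons hy)]
    congr 2
    apply (List.filter_congr ?_).symm
    intro c hc
    have hcy : c ≠ y := by
      rcases List.mem_cons.mp hc with rfl | hmem
      · exact (ne_of_lt hlt).symm
      · exact (ne_of_lt (lt_trans hlt ((List.pairwise_cons.mp hx).1 c hmem))).symm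
    simp [List.contains_eq_mem, List.mem_cons, hcy]
  | case5 x xs y ys hnlt hnlt' ih =>
    have hxy : x = y := le_antisymm (not_lt.mp hnlt') (not_lt.mp hnlt)
    subst hxy
    have htail : xs.filter (fun c => (x :: ys).contains c && pvIsLetter c)
        = xs.filter (fun c => ys.contains c && pvIsLetter c) := by
      apply List.filter_congr
      intro c hc
      have hcx : c ≠ x := (ne_of_lt ((List.pairwise_cons.mp hx).1 c hc)).symm
      simp [List.contains_eq_mem, List.mem_cons, hcx]
    rw [ih (List.Pairwise.of_cons hx) (List.Pairwise.of_cons hy),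
      List.filter_cons, htail]
    have hhead : ((x :: ys).contains x && pvIsLetter x) = pvIsLetter x := by simp
    rw [hhead]
    by_cases hp : pvIsLetter x = true
    · simp [hp]; ring
    · simp only [Bool.not_eq_true] at hp
      simp [hp]

-- membership in the 52-letter alphabet is exactly pvIsLetter
theorem mem_alphabet_iff (c : Char) :
    c ∈ "abcdefghijklmnopqrstuvwxyzABCDEFGHIJKLMNOPQRSTUVWXYZ".toList ↔ pvIsLetter c = true := by
  constructor
  · intro h
    have hall : ("abcdefghijklmnopqrstuvwxyzABCDEFGHIJKLMNOPQRSTUVWXYZ".toList.all pvIsLetter) = true := by decide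
    exact List.all_eq_true.mp hall c h
  · intro h
    have hnat : (97 ≤ c.toNat ∧ c.toNat ≤ 122) ∨ (65 ≤ c.toNat ∧ c.toNat ≤ 90) := by
      simp only [pvIsLetter, Bool.or_eq_true, Bool.and_eq_true, decide_eq_true_eq] at h
      rcases h with ⟨h1, h2⟩ | ⟨h1, h2⟩
      · exact Or.inl ⟨Fin.mk_le_mk.mp h1, Fin.mk_le_mk.mp h2⟩
      · exact Or.inr ⟨Fin.mk_le_mk.mp h1, Fin.mk_le_mk.mp h2⟩
    have hsplit : "abcdefghijklmnopqrstuvwxyzABCDEFGHIJKLMNOPQRSTUVWXYZ".toList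
        = (List.range' 97 26).map Char.ofNat ++ (List.range' 65 26).map Char.ofNat := by decide
    rw [hsplit, List.mem_append]
    rcases hnat with ⟨h1, h2⟩ | ⟨h1, h2⟩
    · exact Or.inl (List.mem_map.mpr ⟨c.toNat, by simp [List.mem_range'_1]; omega, Char.ofNat_toNat c⟩)
    · exact Or.inr (List.mem_map.mpr ⟨c.toNat, by simp [List.mem_range'_1]; omega, Char.ofNat_toNat c⟩)

-- ===== VERDICT (by name: the statement is the Claim_ definition above) =====
set_option maxRecDepth 8192 in
theorem commonChar_spec : Claim_equal_commonChar := by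
  intro a b _
  unfold Spec_commonChar commonChar_alt
  rw [commonChar_eq_filter,
    pvMergeCount_eq _ _ (PySem.List.sorted_ofList_pairwise_lt a.toList)
      (PySem.List.sorted_ofList_pairwise_lt b.toList)]
  congr 1
  apply List.Perm.length_eq
  apply (List.perm_ext_iff_of_nodup ?_ ?_).mpr
  · intro c
    rw [List.mem_filter, List.mem_filter, mem_alphabet_iff]
    simp only [Bool.and_eq_true, List.contains_eq_mem, decide_eq_true_eq,
      PySem.List.mem_sorted, PySem.Set.mem_ofList]
    tauto
  · exact List.Nodup.filter _ (by decide)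
  · exact List.Nodup.filter _
      ((PySem.List.sorted_ofList_pairwise_lt a.toList).imp ne_of_lt)
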